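-- pv_equiv track=rewrite | github.com/nicolagulmini/chaos_game_representation | cgr.py | translate_dna
-- ===== SOURCE A (Python) =====
-- def translate_dna(dna):
--     dna_x = []
--     dna_y = []
--     for i in range(len(dna)):
--         if dna[i] == 'A':
--             dna_x.append(0)
--             dna_y.append(0)
--         elif dna[i] == 'C':
--             dna_x.append(0)
--             dna_y.append(1)
--         elif dna[i] == 'G':
--             dna_x.append(1)
--             dna_y.append(0)
--         elif dna[i] == 'T':
--             dna_x.append(1)
--             dna_y.append(1)
--     return [dna_x, dna_y]
-- ===== SOURCE B (Python) =====
-- def translate_dna(dna):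
--     codes = [i for i in map('ACGT'.find, dna) if i >= 0]
--     return [[i // 2 for i in codes], [i % 2 for i in codes]]
-- ===== Notes on version B (the rewrite author's own statement) =====
-- stated objective: alternative
-- what changed: Replaces the four-way if/elif chain appending to two lists with an arithmetic encoding: each letter becomes its index in 'ACGT' (non-letters filtered out as -1), and the two coordinate lists are then derived in separate passes as index//2 and index%2.
import Mathlib
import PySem

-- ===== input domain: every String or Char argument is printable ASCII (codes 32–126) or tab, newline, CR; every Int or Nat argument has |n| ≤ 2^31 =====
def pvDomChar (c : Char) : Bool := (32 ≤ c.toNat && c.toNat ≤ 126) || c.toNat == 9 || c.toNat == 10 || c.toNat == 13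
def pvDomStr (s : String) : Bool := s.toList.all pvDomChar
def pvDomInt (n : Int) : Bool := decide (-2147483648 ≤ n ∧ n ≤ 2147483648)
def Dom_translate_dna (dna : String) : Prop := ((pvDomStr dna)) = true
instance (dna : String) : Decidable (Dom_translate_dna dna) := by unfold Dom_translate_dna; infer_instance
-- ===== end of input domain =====

-- B replaces A's four-way if/elif dual-append loop with an arithmetic encoding: each letter's
-- index in "ACGT" (non-letters filtered as -1), then separate // 2 and % 2 passes (alternative).


-- ===== PORT A =====
-- one if/elif step of A's loop: appends to both accumulators or leaves them untouched
def translate_dna_step (st : List Int × List Int) (c : Char) : List Int × List Int :=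
  if c = 'A' then (st.1 ++ [0], st.2 ++ [0])
  else if c = 'C' then (st.1 ++ [0], st.2 ++ [1])
  else if c = 'G' then (st.1 ++ [1], st.2 ++ [0])
  else if c = 'T' then (st.1 ++ [1], st.2 ++ [1])
  else st

def translate_dna (dna : String) : List (List Int) :=
  let st := dna.toList.foldl translate_dna_step ([], [])
  [st.1, st.2]

-- ===== PORT B =====
def translate_dna_alt (dna : String) : List (List Int) :=
  let codes := (dna.toList.map (fun c => PySem.Str.find "ACGT" (String.mk [c]))).filter (fun i => 0 ≤ i)
  [codes.map (fun i => PySem.Int.floordiv i 2), codes.map (fun i => PySem.Int.mod i 2)]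

-- ===== PRECONDITION & SPEC =====
def Spec_translate_dna (dna : String) (out : List (List Int)) : Prop := out = translate_dna_alt dna
instance (dna : String) (out : List (List Int)) : Decidable (Spec_translate_dna dna out) := by unfold Spec_translate_dna; infer_instance

-- ===== CLAIM (what is proved, stated in full; the proofs are below) =====
def Claim_equal_translate_dna : Prop := ∀ (dna : String), Dom_translate_dna dna → Spec_translate_dna dna (translate_dna dna)

-- ===== LEMMAS AND PROOFS =====
lemma translate_dna_find_other (c : Char) (hA : c ≠ 'A') (hC : c ≠ 'C')
    (hG : c ≠ 'G') (hT : c ≠ 'T') : PySem.Str.find "ACGT" (String.mk [c]) = -1 := by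
  rw [PySem.Str.find_eq_neg_one_iff]
  intro h
  obtain ⟨u, hpre, hsuf⟩ := List.infix_iff_prefix_suffix.mp h
  have hc : c ∈ (String.mk [c]).toList := by
    rw [show String.mk [c] = String.ofList [c] from rfl, String.toList_ofList]
    exact List.mem_singleton_self c
  have hm : c ∈ ("ACGT".toList) := hsuf.subset (hpre.subset hc)
  simp at hm
  rcases hm with h | h | h | h <;> simp_all

lemma translate_dna_foldl (l : List Char) (xs ys : List Int) :
    l.foldl translate_dna_step (xs, ys) =
      (xs ++ ((l.map (fun c => PySem.Str.find "ACGT" (String.mk [c]))).filter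
                (fun i => 0 ≤ i)).map (fun i => PySem.Int.floordiv i 2),
       ys ++ ((l.map (fun c => PySem.Str.find "ACGT" (String.mk [c]))).filter
                (fun i => 0 ≤ i)).map (fun i => PySem.Int.mod i 2)) := by
  induction l generalizing xs ys with
  | nil => simp
  | cons c t ih =>
    by_cases hA : c = 'A'
    · subst hA
      have hf : PySem.Chars.find ['A', 'C', 'G', 'T'] (String.mk ['A']).toList = 0 := by decide
      simp [translate_dna_step, ih, hf, PySem.Int.floordiv, PySem.Int.mod,
        show ((0:Int).fdiv 2) = 0 from by decide, show ((0:Int).fmod 2) = 0 from by decide]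
    · by_cases hC : c = 'C'
      · subst hC
        have hf : PySem.Chars.find ['A', 'C', 'G', 'T'] (String.mk ['C']).toList = 1 := by decide
        simp [translate_dna_step, ih, hf, PySem.Int.floordiv, PySem.Int.mod,
          show ((1:Int).fdiv 2) = 0 from by decide, show ((1:Int).fmod 2) = 1 from by decide]
      · by_cases hG : c = 'G'
        · subst hG
          have hf : PySem.Chars.find ['A', 'C', 'G', 'T'] (String.mk ['G']).toList = 2 := by decide
          simp [translate_dna_step, ih, hf, PySem.Int.floordiv, PySem.Int.mod,
            show ((2:Int).fdiv 2) = 1 from by decide, show ((2:Int).fmod 2) = 0 from by decide]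
        · by_cases hT : c = 'T'
          · subst hT
            have hf : PySem.Chars.find ['A', 'C', 'G', 'T'] (String.mk ['T']).toList = 3 := by decide
            simp [translate_dna_step, ih, hf, PySem.Int.floordiv, PySem.Int.mod,
              show ((3:Int).fdiv 2) = 1 from by decide, show ((3:Int).fmod 2) = 1 from by decide]
          · have hf := translate_dna_find_other c hA hC hG hT
            simp only [PySem.Str.find_eq] at hf
            have hf' : PySem.Chars.find ['A', 'C', 'G', 'T'] (String.mk [c]).toList = -1 := hf
            simp [translate_dna_step, hA, hC, hG, hT, ih, hf']

-- ===== VERDICT (by name: the statement is the Claim_ definition above) =====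
theorem translate_dna_spec : Claim_equal_translate_dna := by
  intro dna _
  unfold Spec_translate_dna translate_dna translate_dna_alt
  rw [translate_dna_foldl]
  simp
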